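-- pv_equiv track=rewrite | github.com/bipentihexium/wys_arg_tools | wys_lib.py | dontbother17_encrypt
-- ===== SOURCE A (Python) =====
-- def dontbother17_encrypt(data:str, n:int=17) -> str:
-- 	"""encrypts data using with the DONTBOTHER N cypher (N defaults to 17)"""
-- 	index = 0
-- 	result = "-" * len(data)
-- 	places = [i for i in range(len(result))]
-- 	for char in data:
-- 		index = (index + n) % len(places)
-- 		result = result[:places[index]] + char + result[places[index]+1:]
-- 		del places[index]
-- 	return result
-- ===== SOURCE B (Python) =====
-- def dontbother17_encrypt(data: str, n: int = 17) -> str: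
-- 	"""encrypts data using the DONTBOTHER N cypher (N defaults to 17)"""
-- 	out = ["-"] * len(data)
-- 	free = [True] * len(data)
-- 	remaining = len(data)
-- 	index = 0
-- 	for char in data:
-- 		index = (index + n) % remaining
-- 		k = index
-- 		pos = 0
-- 		while not free[pos] or k > 0:
-- 			if free[pos]:
-- 				k -= 1
-- 			pos += 1
-- 		out[pos] = char
-- 		free[pos] = False
-- 		remaining -= 1
-- 	return "".join(out)
-- ===== Notes on version B (the rewrite author's own statement) =====
-- stated objective: alternative
-- what changed: Replaces A's shrinking places-list with del and repeated string re-slicing by a fixed boolean free-slot array scanned for the k-th free position, writing characters into a result array joined once at the end.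
import Mathlib
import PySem

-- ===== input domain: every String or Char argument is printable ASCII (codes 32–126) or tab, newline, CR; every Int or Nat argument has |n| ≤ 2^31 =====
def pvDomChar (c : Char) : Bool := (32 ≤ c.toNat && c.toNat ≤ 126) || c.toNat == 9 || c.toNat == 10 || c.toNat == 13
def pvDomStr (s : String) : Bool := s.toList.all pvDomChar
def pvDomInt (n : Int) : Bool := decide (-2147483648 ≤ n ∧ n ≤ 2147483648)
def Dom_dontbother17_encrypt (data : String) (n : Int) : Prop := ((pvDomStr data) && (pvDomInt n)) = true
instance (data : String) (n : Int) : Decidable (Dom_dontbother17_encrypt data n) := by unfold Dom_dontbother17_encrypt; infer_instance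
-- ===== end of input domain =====

-- B replaces A's shrinking places-list + string re-slicing by a fixed boolean free-slot
-- array scanned for the k-th free position, writing into a result array (alternative; same asymptotic cost).

-- ===== PORT A =====
-- the for-loop of A over `data`, state (index, result, places)
def pvALoop (n : Int) : List Char → Int → List Char → List Int → List Char
  | [], _, result, _ => result
  | c :: cs, index, result, places =>
      let index := PySem.Int.mod (index + n) (places.length : Int)
      let p := PySem.List.pyGetD places index 0
      let result := PySem.List.slice result none (some p) ++ [c] ++ PySem.List.slice result (some (p + 1)) none
      let places := ((PySem.List.pop? places index).map (·.2)).getD places   -- del places[index] (always in range)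
      pvALoop n cs index result places

def dontbother17_encrypt (data : String) (n : Int) : String :=
  String.ofList (pvALoop n data.toList 0 (List.replicate data.toList.length '-')
    (PySem.List.pyRange 0 (data.toList.length : Int) 1))

-- ===== PORT B =====
-- B's inner while loop: position of the k-th free slot (k = index)
def pvScanFree : List Bool → Int → Nat
  | [], _ => 0
  | f :: rest, k => if f then (if k = 0 then 0 else pvScanFree rest (k - 1) + 1) else pvScanFree rest k + 1

-- B's for-loop over `data`, state (index, out, free, remaining)
def pvBLoop (n : Int) : List Char → Int → List Char → List Bool → Int → List Char
  | [], _, out, _, _ => out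
  | c :: cs, index, out, free, remaining =>
      let index := PySem.Int.mod (index + n) remaining
      let pos := pvScanFree free index
      pvBLoop n cs index (out.set pos c) (free.set pos false) (remaining - 1)

def dontbother17_encrypt_alt (data : String) (n : Int) : String :=
  String.ofList (pvBLoop n data.toList 0 (List.replicate data.toList.length '-')
    (List.replicate data.toList.length true) (data.toList.length : Int))

-- ===== PRECONDITION & SPEC =====
def Spec_dontbother17_encrypt (data : String) (n : Int) (out : String) : Prop := out = dontbother17_encrypt_alt data n
instance (data : String) (n : Int) (out : String) : Decidable (Spec_dontbother17_encrypt data n out) := by unfold Spec_dontbother17_encrypt; infer_instance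

-- ===== CLAIM (what is proved, stated in full; the proofs are below) =====
def Claim_equal_dontbother17_encrypt : Prop := ∀ (data : String) (n : Int), Dom_dontbother17_encrypt data n → Spec_dontbother17_encrypt data n (dontbother17_encrypt data n)

-- ===== LEMMAS AND PROOFS =====

-- indices of the `true` entries of a boolean list (A's `places` in terms of B's `free`)
def pvTI : List Bool → List Int
  | [] => []
  | true :: r => 0 :: (pvTI r).map (· + 1)
  | false :: r => (pvTI r).map (· + 1)

theorem pvMap_eraseIdx (l : List Int) (k : Nat) :
    (l.map (· + 1)).eraseIdx k = (l.eraseIdx k).map (· + 1) := by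
  induction l generalizing k with
  | nil => simp
  | cons x xs ih =>
      cases k with
      | zero => simp [List.eraseIdx]
      | succ j => simp [List.eraseIdx_cons_succ, ih]

theorem pvTI_replicate (L : Nat) : pvTI (List.replicate L true) = PySem.List.pyRange 0 (L : Int) 1 := by
  induction L with
  | zero => simp [pvTI]
  | succ m ih =>
      rw [List.replicate_succ]
      show pvTI (true :: List.replicate m true) = _
      rw [pvTI, ih]
      rw [show ((m + 1 : Nat) : Int) = (m : Int) + 1 from by push_cast; ring]
      rw [PySem.List.pyRange_one_cons (by omega : (0:Int) < (m:Int) + 1)]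
      rw [show (0:Int) + 1 = 1 from by ring]
      rw [PySem.List.pyRange_one 1 ((m:Int)+1), PySem.List.pyRange_one 0 (m:Int)]
      have h1 : ((m:Int) + 1 - 1).toNat = m := by omega
      have h2 : ((m:Int) - 0).toNat = m := by omega
      rw [h1, h2]
      simp only [List.map_map]
      congr 1
      apply List.map_congr_left
      intro a _
      simp [Function.comp]
      ring

theorem pvScanFree_getElem (free : List Bool) (k : Nat) (hk : k < (pvTI free).length) :
    (pvTI free)[k] = (pvScanFree free (k : Int) : Int) := by
  induction free generalizing k with
  | nil => simp [pvTI] at hk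
  | cons f r ih =>
      cases f with
      | true =>
          cases k with
          | zero => simp [pvTI, pvScanFree]
          | succ j =>
              have hj : j < (pvTI r).length := by simpa [pvTI] using hk
              have hne : ¬ (((j + 1 : Nat) : Int) = 0) := by omega
              have h1 : ((j + 1 : Nat) : Int) - 1 = (j : Int) := by push_cast; ring
              simp only [pvTI, List.getElem_cons_succ, List.getElem_map,
                pvScanFree, if_true, if_neg hne, h1]
              rw [ih j hj]
              push_cast; ring
      | false =>
          have hj : k < (pvTI r).length := by simpa [pvTI] using hk
          simp only [pvTI, List.getElem_map, pvScanFree, Bool.false_eq_true, if_false]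
          rw [ih k hj]
          push_cast; ring

theorem pvScanFree_lt (free : List Bool) (k : Nat) (hk : k < (pvTI free).length) :
    pvScanFree free (k : Int) < free.length := by
  induction free generalizing k with
  | nil => simp [pvTI] at hk
  | cons f r ih =>
      cases f with
      | true =>
          cases k with
          | zero => simp [pvScanFree]
          | succ j =>
              have hj : j < (pvTI r).length := by simpa [pvTI] using hk
              have hne : ¬ (((j + 1 : Nat) : Int) = 0) := by omega
              have h1 : ((j + 1 : Nat) : Int) - 1 = (j : Int) := by push_cast; ring
              simp only [pvScanFree, if_true, if_neg hne, h1, List.length_cons]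
              have := ih j hj
              omega
      | false =>
          have hj : k < (pvTI r).length := by simpa [pvTI] using hk
          simp only [pvScanFree, Bool.false_eq_true, if_false, List.length_cons]
          have := ih k hj
          omega

theorem pvTI_set (free : List Bool) (k : Nat) (hk : k < (pvTI free).length) :
    pvTI (free.set (pvScanFree free (k : Int)) false) = (pvTI free).eraseIdx k := by
  induction free generalizing k with
  | nil => simp [pvTI] at hk
  | cons f r ih =>
      cases f with
      | true =>
          cases k with
          | zero => simp [pvScanFree, pvTI]
          | succ j =>
              have hj : j < (pvTI r).length := by simpa [pvTI] using hk
              have hne : ¬ (((j + 1 : Nat) : Int) = 0) := by omega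
              have h1 : ((j + 1 : Nat) : Int) - 1 = (j : Int) := by push_cast; ring
              simp only [pvScanFree, if_true, if_neg hne, h1]
              show pvTI (true :: r.set (pvScanFree r (j:Int)) false) = _
              rw [pvTI, ih j hj]
              simp only [pvTI, List.eraseIdx_cons_succ, pvMap_eraseIdx]
      | false =>
          have hj : k < (pvTI r).length := by simpa [pvTI] using hk
          simp only [pvScanFree, Bool.false_eq_true, if_false]
          show pvTI (false :: r.set (pvScanFree r (k:Int)) false) = _
          rw [pvTI, ih k hj]
          simp only [pvTI, pvMap_eraseIdx]

theorem pvSlice_set (res : List Char) (pos : Nat) (c : Char) (h : pos < res.length) :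
    PySem.List.slice res none (some ((pos : Nat) : Int)) ++ [c] ++
      PySem.List.slice res (some (((pos : Nat) : Int) + 1)) none = res.set pos c := by
  have h1 : (((pos : Nat) : Int) + 1) = (((pos + 1 : Nat)) : Int) := by push_cast; ring
  rw [PySem.List.slice_to_natCast, h1, PySem.List.slice_from_natCast]
  rw [List.set_eq_take_append_cons_drop, if_pos h]
  simp

theorem pvLoop_eq (n : Int) (cs : List Char) :
    ∀ (idx : Int) (res : List Char) (free : List Bool),
      cs.length ≤ (pvTI free).length → free.length = res.length →
      pvALoop n cs idx res (pvTI free) = pvBLoop n cs idx res free (((pvTI free).length : Nat) : Int) := by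
  induction cs with
  | nil => intro idx res free _ _; rfl
  | cons c cs ih =>
      intro idx res free hlen hfl
      have hm : 0 < (pvTI free).length := by simp at hlen; omega
      have hmI : (0:Int) < ((pvTI free).length : Int) := by exact_mod_cast hm
      set m : Int := ((pvTI free).length : Int) with hmdef
      set i' : Int := PySem.Int.mod (idx + n) m with hi'
      have hge : 0 ≤ i' := PySem.Int.mod_nonneg _ hmI
      have hltI : i' < m := PySem.Int.mod_lt _ hmI
      set k : Nat := i'.toNat with hkdef
      have hik : i' = (k : Int) := by omega
      have hklt : k < (pvTI free).length := by omega
      set pos : Nat := pvScanFree free (k : Int) with hpos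
      have hposlt : pos < free.length := pvScanFree_lt free k hklt
      rw [pvALoop, pvBLoop]
      have hget : PySem.List.pyGetD (pvTI free) i' 0 = ((pos : Nat) : Int) := by
        rw [hik, PySem.List.pyGetD_natCast, List.getD_eq_getElem _ _ hklt,
          pvScanFree_getElem free k hklt]
      have hpop : ((PySem.List.pop? (pvTI free) i').map (·.2)).getD (pvTI free)
          = pvTI (free.set pos false) := by
        rw [hik, PySem.List.pop?_natCast (pvTI free) k hklt]
        simp only [Option.map_some, Option.getD_some]
        rw [hpos]
        exact (pvTI_set free k hklt).symm
      rw [hget, hpop, pvSlice_set res pos c (by omega)]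
      have hlen' : cs.length ≤ (pvTI (free.set pos false)).length := by
        rw [hpos, pvTI_set free k hklt, List.length_eraseIdx_of_lt hklt]
        simp at hlen; omega
      have hfl' : (free.set pos false).length = (res.set pos c).length := by
        simp [hfl]
      rw [ih i' (res.set pos c) (free.set pos false) hlen' hfl']
      have hmod : PySem.Int.mod (idx + n) m = (k : Int) := by rw [← hi']; exact hik
      have hm1 : (((pvTI (free.set (pvScanFree free (k:Int)) false)).length : Nat) : Int) = m - 1 := by
        rw [pvTI_set free k hklt, List.length_eraseIdx_of_lt hklt]; omega
      simp only [hpos, hik, hmod, hm1]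

-- ===== VERDICT (by name: the statement is the Claim_ definition above) =====
theorem dontbother17_encrypt_spec : Claim_equal_dontbother17_encrypt := by
  intro data n _
  unfold Spec_dontbother17_encrypt dontbother17_encrypt dontbother17_encrypt_alt
  rw [← pvTI_replicate data.toList.length,
    pvLoop_eq n data.toList 0 (List.replicate data.toList.length '-')
      (List.replicate data.toList.length true)
      (by rw [pvTI_replicate]; simp [PySem.List.length_pyRange_one])
      (by simp)]
  congr 2
  rw [pvTI_replicate]
  simp [PySem.List.length_pyRange_one]
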